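-- pv_equiv track=rewrite | github.com/AhnafTahmid98/Savo_Pi | src/savo_base/savo_base/utils/topic_names.py | validate_topic_names
-- ===== SOURCE A (Python) =====
-- from typing import Dict, Iterable, Mapping, Optional
--
-- def ensure_leading_slash(name: str) -> str:
--     """Return topic with a leading '/'."""
--     s = str(name or "").strip()
--     if not s:
--         return "/"
--     return s if s.startswith("/") else f"/{s}"
--
-- def strip_trailing_slash(name: str) -> str:
--     """Remove trailing slash unless the topic is root ('/')."""
--     s = ensure_leading_slash(name)
--     if s != "/" and s.endswith("/"):
--         return s[:-1]
--     return s
--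
-- def normalize_topic_name(name: str) -> str:
--     """
--     Normalize a topic string:
--     - ensure leading slash
--     - collapse repeated slashes
--     - remove trailing slash (except root)
--     """
--     s = ensure_leading_slash(name)
--     while "//" in s:
--         s = s.replace("//", "/")
--     return strip_trailing_slash(s)
--
-- def validate_topic_names(topics: Iterable[str]) -> bool:
--     """
--     Basic topic-name sanity check.
--
--     This is intentionally lightweight and not a full ROS name validator.
--     Returns True if all names:
--     - are non-empty after normalization
--     - start with '/'
--     - do not contain spaces
--     """
--     for t in topics:
--         n = normalize_topic_name(t)
--         if not n or not n.startswith("/"):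
--             return False
--         if " " in n:
--             return False
--     return True
-- ===== SOURCE B (Python) =====
-- def validate_topic_names(topics):
--     # Normalization always yields a non-empty '/'-prefixed name and never touches
--     # interior spaces, so the only effective test is: no space after stripping.
--     return all(' ' not in str(t or '').strip() for t in topics)
-- ===== Notes on version B (the rewrite author's own statement) =====
-- stated objective: simpler
-- what changed: B drops A's whole normalization pipeline (leading-slash insertion, repeated replace passes to collapse slashes, trailing-slash stripping) after observing that normalized names are always non-empty and '/'-prefixed, reducing the check to 'no space in the stripped name'.
import Mathlib
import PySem

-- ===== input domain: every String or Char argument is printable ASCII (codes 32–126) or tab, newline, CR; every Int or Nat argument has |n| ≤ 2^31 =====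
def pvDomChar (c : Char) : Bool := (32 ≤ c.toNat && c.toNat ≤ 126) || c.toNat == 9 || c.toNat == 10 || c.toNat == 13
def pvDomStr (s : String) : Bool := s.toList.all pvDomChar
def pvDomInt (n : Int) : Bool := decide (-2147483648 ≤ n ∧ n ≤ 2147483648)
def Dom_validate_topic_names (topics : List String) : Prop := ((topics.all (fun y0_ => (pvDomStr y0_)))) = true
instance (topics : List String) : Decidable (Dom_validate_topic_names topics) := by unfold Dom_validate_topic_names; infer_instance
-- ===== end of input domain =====

-- B drops A's normalization pipeline: normalized names are always non-empty and '/'-prefixed,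
-- so the only effective check is 'no space in the stripped name' (objective: simpler).

-- ===== PORT A =====
-- ensure_leading_slash (str(name or "") on a string is the string itself, '' staying '')
def ensureLeadingSlash (name : List Char) : List Char :=
  if PySem.Chars.strip (if name = [] then [] else name) = [] then ['/']
  else if PySem.Chars.startswith (PySem.Chars.strip (if name = [] then [] else name)) ['/'] then
    PySem.Chars.strip (if name = [] then [] else name)
  else '/' :: PySem.Chars.strip (if name = [] then [] else name)

-- strip_trailing_slash
def stripTrailingSlash (name : List Char) : List Char :=
  if ensureLeadingSlash name ≠ ['/'] ∧ PySem.Chars.endswith (ensureLeadingSlash name) ['/'] = true then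
    PySem.List.slice (ensureLeadingSlash name) none (some (-1))
  else ensureLeadingSlash name

-- while "//" in s: s = s.replace("//", "/") — fuel-bounded (each pass shortens s, so
-- s.length + 1 passes always suffice; the fuel only makes the same loop total)
def collapseSlashes : Nat → List Char → List Char
  | 0, s => s
  | fuel + 1, s =>
    if PySem.Chars.isIn ['/', '/'] s = true then
      collapseSlashes fuel (PySem.Chars.replace s ['/', '/'] ['/'])
    else s

-- normalize_topic_name
def normalizeTopicName (name : List Char) : List Char :=
  let s := ensureLeadingSlash name
  stripTrailingSlash (collapseSlashes (s.length + 1) s)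

-- the for-loop of validate_topic_names with its early returns
def validateLoopA : List String → Bool
  | [] => true
  | t :: rest =>
    let n := normalizeTopicName t.toList
    if n = [] ∨ ¬ PySem.Chars.startswith n ['/'] = true then false
    else if PySem.Chars.isIn [' '] n = true then false
    else validateLoopA rest

def validate_topic_names (topics : List String) : Bool := validateLoopA topics

-- ===== PORT B =====
def validate_topic_names_alt (topics : List String) : Bool :=
  topics.all (fun t => !PySem.Chars.isIn [' '] (PySem.Chars.strip (if t = "" then "" else t).toList))

-- ===== PRECONDITION & SPEC =====
def Spec_validate_topic_names (topics : List String) (out : Bool) : Prop := out = validate_topic_names_alt topics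
instance (topics : List String) (out : Bool) : Decidable (Spec_validate_topic_names topics out) := by unfold Spec_validate_topic_names; infer_instance

-- ===== CLAIM (what is proved, stated in full; the proofs are below) =====
def Claim_equal_validate_topic_names : Prop := ∀ (topics : List String), Dom_validate_topic_names topics → Spec_validate_topic_names topics (validate_topic_names topics)

-- ===== LEMMAS AND PROOFS =====

-- head of dropWhile fails the predicate
theorem head?_dropWhile_false (p : Char → Bool) (l : List Char) (c : Char)
    (h : (l.dropWhile p).head? = some c) : p c = false := by
  have hne : l.dropWhile p ≠ [] := by intro h0; rw [h0] at h; simp at h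
  have hh := List.head_dropWhile_not p hne
  rw [List.head?_eq_some_head hne] at h
  simp only [Option.some.injEq] at h
  simpa [h] using hh

theorem rstrip_last_not_space (s : List Char) (c : Char)
    (h : (PySem.Chars.rstrip s).getLast? = some c) : PySem.Chars.isspace c = false := by
  apply head?_dropWhile_false PySem.Chars.isspace s.reverse c
  simpa [PySem.Chars.rstrip, List.getLast?_reverse] using h

theorem strip_last_not_space (s : List Char) (c : Char)
    (h : (PySem.Chars.strip s).getLast? = some c) : PySem.Chars.isspace c = false := by
  exact rstrip_last_not_space _ c (by simpa [PySem.Chars.strip] using h)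

theorem lstrip_eq_self (s : List Char) (c : Char) (hh : s.head? = some c)
    (hc : PySem.Chars.isspace c = false) : PySem.Chars.lstrip s = s := by
  cases s with
  | nil => simp at hh
  | cons a t =>
    simp only [List.head?_cons, Option.some.injEq] at hh
    subst hh
    simp [PySem.Chars.lstrip, hc]

theorem rstrip_eq_self (s : List Char) (c : Char) (hh : s.getLast? = some c)
    (hc : PySem.Chars.isspace c = false) : PySem.Chars.rstrip s = s := by
  have hrev : s.reverse.head? = some c := by simpa [List.head?_reverse] using hh
  cases hr : s.reverse with
  | nil => simp [hr] at hrev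
  | cons a t =>
    rw [hr] at hrev
    simp only [List.head?_cons, Option.some.injEq] at hrev
    subst hrev
    have : PySem.Chars.rstrip s = (List.dropWhile PySem.Chars.isspace s.reverse).reverse := rfl
    rw [this, hr, List.dropWhile_cons]
    simp only [hc, Bool.false_eq_true, if_false]
    rw [← hr, List.reverse_reverse]

theorem strip_eq_self (s : List Char) (ch cl : Char) (hh : s.head? = some ch)
    (hch : PySem.Chars.isspace ch = false) (hl : s.getLast? = some cl)
    (hcl : PySem.Chars.isspace cl = false) : PySem.Chars.strip s = s := by
  have h1 : PySem.Chars.lstrip s = s := lstrip_eq_self s ch hh hch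
  show PySem.Chars.rstrip (PySem.Chars.lstrip s) = s
  rw [h1]; exact rstrip_eq_self s cl hl hcl

-- === replace("//", "/") facts, proved on the fuelled worker go ===

theorem go_acc (old new : List Char) :
    ∀ (fuel : Nat) (l acc : List Char),
      PySem.Chars.replace.go old new fuel l acc = acc.reverse ++ PySem.Chars.replace.go old new fuel l [] := by
  intro fuel
  induction fuel with
  | zero => intro l acc; simp [PySem.Chars.replace.go]
  | succ n ih =>
    intro l acc
    cases l with
    | nil => simp [PySem.Chars.replace.go]
    | cons c t =>
      simp only [PySem.Chars.replace.go]
      split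
      · rw [ih _ (new.reverse ++ acc), ih _ (new.reverse ++ [])]
        simp
      · rw [ih _ (c :: acc), ih _ (c :: [])]
        simp

theorem go_mem (old new : List Char) (c : Char) (hco : c ∉ old) (hcn : c ∉ new) :
    ∀ (fuel : Nat) (l acc : List Char),
      (c ∈ PySem.Chars.replace.go old new fuel l acc ↔ c ∈ acc ∨ c ∈ l) := by
  intro fuel
  induction fuel with
  | zero => intro l acc; simp [PySem.Chars.replace.go, or_comm]
  | succ n ih =>
    intro l acc
    cases l with
    | nil => simp [PySem.Chars.replace.go]
    | cons a t =>
      simp only [PySem.Chars.replace.go]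
      split
      · rename_i hpre
        rw [ih]
        have hl : old ++ List.drop old.length (a :: t) = a :: t :=
          List.prefix_iff_eq_append.mp (List.isPrefixOf_iff_prefix.mp hpre)
        constructor
        · rintro (h | h)
          · simp at h
            rcases h with h | h
            · exact absurd h hcn
            · exact Or.inl h
          · refine Or.inr ?_
            rw [← hl]; exact List.mem_append_right _ h
        · rintro (h | h)
          · exact Or.inl (by simp [h])
          · rw [← hl] at h
            rcases List.mem_append.mp h with h | h
            · exact absurd h hco
            · exact Or.inr h
      · rw [ih]
        constructor
        · rintro (h | h)
          · simp at h
            rcases h with h | h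
            · exact Or.inr (by simp [h])
            · exact Or.inl h
          · exact Or.inr (by simp [h])
        · rintro (h | h)
          · exact Or.inl (by simp [h])
          · simp at h
            rcases h with h | h
            · exact Or.inl (by simp [h])
            · exact Or.inr h

theorem replace_mem (s : List Char) (c : Char) (hco : c ∉ (['/', '/'] : List Char))
    (hcn : c ∉ (['/'] : List Char)) :
    (c ∈ PySem.Chars.replace s ['/', '/'] ['/'] ↔ c ∈ s) := by
  show c ∈ PySem.Chars.replace.go ['/', '/'] ['/'] s.length s [] ↔ c ∈ s
  rw [go_mem _ _ c hco hcn]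
  simp

-- result of go starts with '/' when the input does (old = "//", new = "/")
theorem go_head (fuel : Nat) (t : List Char) :
    ∃ r, PySem.Chars.replace.go ['/', '/'] ['/'] fuel ('/' :: t) [] = '/' :: r := by
  cases fuel with
  | zero => exact ⟨t, rfl⟩
  | succ n =>
    simp only [PySem.Chars.replace.go]
    split
    · rw [go_acc]
      exact ⟨_, rfl⟩
    · rw [go_acc]
      exact ⟨_, rfl⟩

theorem pvGetLast?_cons_of_ne (a : Char) (t : List Char) (h : t ≠ []) :
    (a :: t).getLast? = t.getLast? := by
  cases t with
  | nil => exact absurd rfl h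
  | cons b u => simp [List.getLast?_cons_cons]

-- last char of go's result is non-whitespace, given the input's last char is
theorem go_last (old new : List Char) (hnew : new = ['/']) :
    ∀ (fuel : Nat) (l acc : List Char),
      (∀ c, l.getLast? = some c → PySem.Chars.isspace c = false) →
      (l = [] → ∃ c, acc.head? = some c ∧ PySem.Chars.isspace c = false) →
      ∃ c, (PySem.Chars.replace.go old new fuel l acc).getLast? = some c ∧ PySem.Chars.isspace c = false := by
  intro fuel
  induction fuel with
  | zero =>
    intro l acc hl hacc
    cases l with
    | nil =>
      rcases hacc rfl with ⟨c, hc, hcs⟩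
      refine ⟨c, ?_, hcs⟩
      simp [PySem.Chars.replace.go, List.getLast?_reverse, hc]
    | cons a t =>
      rcases List.getLast?_isSome.mpr (by simp : (a :: t : List Char) ≠ []) |> Option.isSome_iff_exists.mp with ⟨c, hc⟩
      refine ⟨c, ?_, hl c hc⟩
      simp [PySem.Chars.replace.go, hc]
  | succ n ih =>
    intro l acc hl hacc
    cases l with
    | nil =>
      rcases hacc rfl with ⟨c, hc, hcs⟩
      refine ⟨c, ?_, hcs⟩
      simp [PySem.Chars.replace.go, List.getLast?_reverse, hc]
    | cons a t =>
      simp only [PySem.Chars.replace.go]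
      split
      · rename_i hpre
        apply ih
        · intro c hc
          apply hl c
          have hlc : old ++ List.drop old.length (a :: t) = a :: t :=
            List.prefix_iff_eq_append.mp (List.isPrefixOf_iff_prefix.mp hpre)
          have hne : List.drop old.length (a :: t) ≠ [] := by
            intro h0; rw [h0] at hc; simp at hc
          rw [← hlc, List.getLast?_append_of_ne_nil _ hne]
          exact hc
        · intro _
          exact ⟨'/', by simp [hnew], by decide⟩
      · apply ih
        · intro c hc
          apply hl c
          have hne : t ≠ [] := by intro h0; rw [h0] at hc; simp at hc
          rw [pvGetLast?_cons_of_ne _ _ hne]; exact hc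
        · intro ht
          subst ht
          exact ⟨a, by simp, hl a (by simp)⟩

-- === shape/membership invariant carried through A's pipeline ===

-- SpInv s: s starts with '/', its last char is non-whitespace, and it contains a space iff m does
def SpInv (m : Prop) (s : List Char) : Prop :=
  s.head? = some '/' ∧ (∀ c, s.getLast? = some c → PySem.Chars.isspace c = false) ∧ (' ' ∈ s ↔ m)

theorem replace_inv (m : Prop) (s : List Char) (h : SpInv m s) :
    SpInv m (PySem.Chars.replace s ['/', '/'] ['/']) := by
  obtain ⟨hh, hl, hm⟩ := h
  cases s with
  | nil => simp at hh
  | cons a t =>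
    simp only [List.head?_cons, Option.some.injEq] at hh
    subst hh
    refine ⟨?_, ?_, ?_⟩
    · show (PySem.Chars.replace.go ['/', '/'] ['/'] ('/' :: t).length ('/' :: t) []).head? = some '/'
      rcases go_head ('/' :: t).length t with ⟨r, hr⟩
      rw [hr]; simp
    · intro c hc
      rcases go_last ['/', '/'] ['/'] rfl ('/' :: t).length ('/' :: t) [] hl (by simp) with ⟨c', hc', hcs⟩
      have : (PySem.Chars.replace ('/' :: t) ['/', '/'] ['/']).getLast? = some c' := hc'
      rw [this] at hc
      simp only [Option.some.injEq] at hc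
      subst hc; exact hcs
    · rw [replace_mem _ ' ' (by decide) (by decide)]
      exact hm

theorem collapse_inv (m : Prop) (fuel : Nat) (s : List Char) (h : SpInv m s) :
    SpInv m (collapseSlashes fuel s) := by
  induction fuel generalizing s with
  | zero => exact h
  | succ n ih =>
    simp only [collapseSlashes]
    split
    · exact ih _ (replace_inv m s h)
    · exact h

-- ensure_leading_slash establishes the invariant relative to ' ' ∈ strip(name)
theorem ensure_inv (name : List Char) :
    SpInv (' ' ∈ PySem.Chars.strip name) (ensureLeadingSlash name) := by
  have hif : (if name = [] then ([] : List Char) else name) = name := by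
    split <;> simp_all
  unfold ensureLeadingSlash
  rw [hif]
  split
  · rename_i hs
    refine ⟨rfl, by intro c hc; simp at hc; subst hc; decide, by simp [hs]⟩
  · rename_i hs
    have hne : PySem.Chars.strip name ≠ [] := hs
    rcases Option.isSome_iff_exists.mp (List.getLast?_isSome.mpr hne) with ⟨cl, hcl⟩
    have hcls := strip_last_not_space name cl hcl
    split
    · rename_i hpre
      have hp : ['/'] <+: PySem.Chars.strip name := List.isPrefixOf_iff_prefix.mp hpre
      rcases hp with ⟨r, hr⟩
      refine ⟨?_, ?_, Iff.rfl⟩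
      · rw [← hr]; simp
      · intro c hc; rw [hcl] at hc; simp only [Option.some.injEq] at hc; subst hc; exact hcls
    · refine ⟨by simp, ?_, by simp⟩
      intro c hc
      rw [pvGetLast?_cons_of_ne _ _ hne, hcl] at hc
      simp only [Option.some.injEq] at hc; subst hc; exact hcls

-- ensure_leading_slash is the identity on a string satisfying the invariant
theorem ensure_of_inv (m : Prop) (s : List Char) (h : SpInv m s) : ensureLeadingSlash s = s := by
  obtain ⟨hh, hl, _⟩ := h
  have hne : s ≠ [] := by intro h0; rw [h0] at hh; simp at hh
  rcases Option.isSome_iff_exists.mp (List.getLast?_isSome.mpr hne) with ⟨cl, hcl⟩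
  have hstrip : PySem.Chars.strip s = s :=
    strip_eq_self s '/' cl hh (by decide) hcl (hl cl hcl)
  have hif : (if s = [] then ([] : List Char) else s) = s := by split <;> simp_all
  unfold ensureLeadingSlash
  rw [hif, hstrip]
  rw [if_neg hne, if_pos]
  cases s with
  | nil => exact absurd rfl hne
  | cons a t =>
    simp only [List.head?_cons, Option.some.injEq] at hh
    subst hh
    simp [PySem.Chars.startswith, List.isPrefixOf]

-- strip_trailing_slash keeps the head and the space content
theorem stripTrailing_inv (m : Prop) (s : List Char) (h : SpInv m s) :
    (stripTrailingSlash s).head? = some '/' ∧ (' ' ∈ stripTrailingSlash s ↔ m) := by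
  obtain ⟨hh, hl, hm⟩ := h
  unfold stripTrailingSlash
  rw [ensure_of_inv m s ⟨hh, hl, hm⟩]
  split
  · rename_i hcond
    obtain ⟨hne1, hsuf⟩ := hcond
    have hslice : PySem.List.slice s none (some (-1)) = s.dropLast := by
      simp only [PySem.List.slice, Int.reduceNeg, Order.lt_one_iff, PySem.List.clampIdx_neg_ofNat,
        tsub_zero, List.drop_zero]
      exact List.dropLast_eq_take.symm
    rw [hslice]
    have hsfx : ['/'] <:+ s := List.isSuffixOf_iff_suffix.mp hsuf
    rcases hsfx with ⟨r, hr⟩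
    have hs_ne : s ≠ [] := by intro h0; rw [h0] at hh; simp at hh
    have hr_ne : r ≠ [] := by
      intro h0; rw [h0] at hr; simp at hr
      exact hne1 hr.symm
    have hdl : s.dropLast = r := by rw [← hr]; simp
    constructor
    · rw [hdl]
      cases r with
      | nil => exact absurd rfl hr_ne
      | cons a t =>
        have : s.head? = some a := by rw [← hr]; simp
        rw [hh] at this
        simp only [Option.some.injEq] at this
        simp [← this]
    · rw [hdl, ← hm, ← hr]
      simp
  · exact ⟨hh, hm⟩

-- membership in a list of chars expressed through Python's 'in'
theorem isIn_singleton (c : Char) (l : List Char) :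
    PySem.Chars.isIn [c] l = true ↔ c ∈ l := by
  rw [PySem.Chars.isIn_iff_infix]
  exact List.singleton_infix_iff c l

-- per-element equivalence: A's loop body test vs B's
theorem element_eq (t : String) :
    (let n := normalizeTopicName t.toList
     if n = [] ∨ ¬ PySem.Chars.startswith n ['/'] = true then false
     else if PySem.Chars.isIn [' '] n = true then false else true) =
    (!PySem.Chars.isIn [' '] (PySem.Chars.strip (if t = "" then "" else t).toList)) := by
  have hifs : (if t = "" then "" else t).toList = t.toList := by
    split <;> simp_all
  rw [hifs]
  have hinv0 := ensure_inv t.toList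
  have hinv := collapse_inv _ ((ensureLeadingSlash t.toList).length + 1) _ hinv0
  have hfinal := stripTrailing_inv _ _ hinv
  obtain ⟨hhd, hmem⟩ := hfinal
  have hn : normalizeTopicName t.toList =
      stripTrailingSlash (collapseSlashes ((ensureLeadingSlash t.toList).length + 1) (ensureLeadingSlash t.toList)) := rfl
  simp only [← hn] at hhd hmem
  set n := normalizeTopicName t.toList with hndef
  have hne : n ≠ [] := by intro h0; rw [h0] at hhd; simp at hhd
  have hsw : PySem.Chars.startswith n ['/'] = true := by
    cases hcn : n with
    | nil => exact absurd hcn hne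
    | cons a r =>
      rw [hcn] at hhd
      simp only [List.head?_cons, Option.some.injEq] at hhd
      subst hhd
      simp [PySem.Chars.startswith, List.isPrefixOf]
  simp only [hne, hsw, not_true, or_false, if_false]
  by_cases hsp : ' ' ∈ PySem.Chars.strip t.toList
  · have hx : PySem.Chars.isIn [' '] (PySem.Chars.strip t.toList) = true :=
      (isIn_singleton _ _).mpr hsp
    rw [if_pos ((isIn_singleton ' ' n).mpr (hmem.mpr hsp)), hx]
    rfl
  · have hx : PySem.Chars.isIn [' '] (PySem.Chars.strip t.toList) = false :=
      Bool.eq_false_iff.mpr (fun h => hsp ((isIn_singleton _ _).mp h))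
    have hnx : PySem.Chars.isIn [' '] n = false :=
      Bool.eq_false_iff.mpr (fun h => hsp (hmem.mp ((isIn_singleton _ _).mp h)))
    rw [if_neg (by simp [hnx]), hx]
    rfl

theorem loop_eq (topics : List String) : validateLoopA topics = validate_topic_names_alt topics := by
  induction topics with
  | nil => rfl
  | cons t rest ih =>
    show validateLoopA (t :: rest) = validate_topic_names_alt (t :: rest)
    have he := element_eq t
    simp only [validateLoopA] at *
    simp only [validate_topic_names_alt, List.all_cons] at *
    by_cases h1 : normalizeTopicName t.toList = [] ∨ ¬ PySem.Chars.startswith (normalizeTopicName t.toList) ['/'] = true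
    · rw [if_pos h1]
      rw [if_pos h1] at he
      rw [← he]
      simp
    · rw [if_neg h1]
      rw [if_neg h1] at he
      by_cases h2 : PySem.Chars.isIn [' '] (normalizeTopicName t.toList) = true
      · rw [if_pos h2]; rw [if_pos h2] at he
        rw [← he]; simp
      · rw [if_neg h2]; rw [if_neg h2] at he
        rw [← he, ih]
        simp

-- ===== VERDICT (by name: the statement is the Claim_ definition above) =====
theorem validate_topic_names_spec : Claim_equal_validate_topic_names := by
  intro topics _
  unfold Spec_validate_topic_names validate_topic_names
  exact loop_eq topics
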